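-- pv_equiv track=rewrite | github.com/tueda/PS2022SS | scripts/viewer.py | is_empty_block
-- ===== SOURCE A (Python) =====
-- from typing import Dict, List, Optional, Set, Tuple
--
-- StringList = List[str]
--
-- def is_empty_block(lines: StringList) -> bool:
--     """Return True for an empty block of lines."""
--     first = True
--     for line in lines:
--         if first:
--             first = False
--             if line.startswith("#"):
--                 continue
--         if line.strip():
--             return False
--     return True
-- ===== SOURCE B (Python) =====
-- def is_empty_block(lines):
--     """Return True for an empty block of lines."""
--     nonblank = sum(1 for line in lines if line.strip())
--     allowed = 1 if lines and lines[0].startswith("#") else 0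
--     return nonblank == allowed
-- ===== Notes on version B (the rewrite author's own statement) =====
-- stated objective: alternative
-- what changed: Instead of a stateful early-exit scan with a first-line flag, B counts all non-blank lines in one uniform pass and compares the count to the allowance (1 if the first line is a '#' comment, else 0); correctness rests on a '#'-leading line always being non-blank.
import Mathlib
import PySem

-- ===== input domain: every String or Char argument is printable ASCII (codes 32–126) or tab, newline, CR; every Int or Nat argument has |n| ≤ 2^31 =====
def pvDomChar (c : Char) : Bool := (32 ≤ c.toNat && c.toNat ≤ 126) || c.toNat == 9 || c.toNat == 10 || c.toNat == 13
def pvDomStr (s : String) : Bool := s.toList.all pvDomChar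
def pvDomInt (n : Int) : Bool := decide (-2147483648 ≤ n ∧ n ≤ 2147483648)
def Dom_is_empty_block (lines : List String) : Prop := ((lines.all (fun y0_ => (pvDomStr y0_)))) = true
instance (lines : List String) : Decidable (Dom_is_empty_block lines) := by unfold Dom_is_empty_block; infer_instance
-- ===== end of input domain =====

-- B replaces A's stateful early-exit scan by counting all non-blank lines and comparing
-- the count to the allowance earned by a leading '#' comment line; objective: alternative.

-- ===== PORT A =====
-- the for-loop with the mutable `first` flag, as structural recursion on the remaining lines
def isEmptyGoA : List String → Bool → Bool
  | [], _ => true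
  | line :: rest, first =>
    if first then
      if PySem.Str.startswith line "#" then isEmptyGoA rest false
      else if PySem.Str.strip line ≠ "" then false else isEmptyGoA rest false
    else if PySem.Str.strip line ≠ "" then false else isEmptyGoA rest false

def is_empty_block (lines : List String) : Bool := isEmptyGoA lines true

-- ===== PORT B =====
def is_empty_block_alt (lines : List String) : Bool :=
  let nonblank := lines.countP (fun line => PySem.Str.strip line ≠ "")
  let allowed : Nat :=
    match lines with
    | l :: _ => if PySem.Str.startswith l "#" then 1 else 0
    | [] => 0
  nonblank == allowed

-- ===== PRECONDITION & SPEC =====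
def Spec_is_empty_block (lines : List String) (out : Bool) : Prop := out = is_empty_block_alt lines
instance (lines : List String) (out : Bool) : Decidable (Spec_is_empty_block lines out) := by unfold Spec_is_empty_block; infer_instance

-- ===== CLAIM (what is proved, stated in full; the proofs are below) =====
def Claim_equal_is_empty_block : Prop := ∀ (lines : List String), Dom_is_empty_block lines → Spec_is_empty_block lines (is_empty_block lines)

-- ===== LEMMAS AND PROOFS =====
-- A's scan after the first line returns true iff no remaining line is non-blank
theorem isEmptyGoA_false_eq_countP (lines : List String) :
    isEmptyGoA lines false = (lines.countP (fun line => PySem.Str.strip line ≠ "") == 0) := by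
  induction lines with
  | nil => rfl
  | cons l rest ih =>
    simp only [isEmptyGoA, ih, List.countP_cons]
    by_cases h : PySem.Str.strip l = "" <;> simp [h]

-- a line starting with '#' strips to a non-empty string ('#' is not whitespace)
theorem strip_ne_empty_of_startswith_hash (l : String)
    (h : PySem.Chars.startswith l.toList ['#'] = true) : PySem.Str.strip l ≠ "" := by
  rw [PySem.Chars.startswith_iff] at h
  intro hc
  have htl : (PySem.Str.strip l).toList = [] := by rw [hc]; rfl
  rw [PySem.Str.toList_strip] at htl
  have hmem : '#' ∈ l.toList := h.mem (by simp)
  have hmem2 : '#' ∈ PySem.Chars.lstrip l.toList := by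
    unfold PySem.Chars.lstrip
    have hsp : '#' ∈ List.takeWhile PySem.Chars.isspace l.toList ++
        List.dropWhile PySem.Chars.isspace l.toList := by
      rw [List.takeWhile_append_dropWhile]; exact hmem
    rcases List.mem_append.mp hsp with h1 | h2
    · exact absurd (List.mem_takeWhile_imp h1) (by decide)
    · exact h2
  have hmem3 : '#' ∈ PySem.Chars.strip l.toList := by
    unfold PySem.Chars.strip PySem.Chars.rstrip
    rw [List.mem_reverse]
    have hsp : '#' ∈ List.takeWhile PySem.Chars.isspace (PySem.Chars.lstrip l.toList).reverse ++
        List.dropWhile PySem.Chars.isspace (PySem.Chars.lstrip l.toList).reverse := by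
      rw [List.takeWhile_append_dropWhile]; exact List.mem_reverse.mpr hmem2
    rcases List.mem_append.mp hsp with h1 | h2
    · exact absurd (List.mem_takeWhile_imp h1) (by decide)
    · exact h2
  rw [htl] at hmem3
  exact List.not_mem_nil hmem3

theorem beq_zero_eq_beq_succ_one (n : Nat) : (n == 0) = (n + 1 == 1) := by
  cases n <;> rfl

-- ===== VERDICT (by name: the statement is the Claim_ definition above) =====
theorem is_empty_block_spec : Claim_equal_is_empty_block := by
  intro lines _
  unfold Spec_is_empty_block is_empty_block is_empty_block_alt
  cases lines with
  | nil => rfl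
  | cons l rest =>
    simp only [isEmptyGoA, List.countP_cons, PySem.Str.startswith_eq,
      show ("#".toList) = ['#'] from rfl]
    by_cases hs : PySem.Chars.startswith l.toList ['#'] = true
    · have hne := strip_ne_empty_of_startswith_hash l hs
      have hd : decide (PySem.Str.strip l ≠ "") = true := decide_eq_true hne
      simp only [hs, if_true, hd, isEmptyGoA_false_eq_countP]
      exact beq_zero_eq_beq_succ_one _
    · simp only [isEmptyGoA_false_eq_countP]
      by_cases h : PySem.Str.strip l = "" <;> simp [h, hs]
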